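-- pv_equiv track=rewrite | github.com/jbdanquah2/competitive-programming | A2SV Remote Contest #26 05-Aug-2024/A - Planets 187557.py | minimum_destruction_cost
-- ===== SOURCE A (Python) =====
-- def minimum_destruction_cost(test_cases):
--     results = []
--
--     for case in test_cases:
--         n, c, orbits = case
--         from collections import Counter
--         orbit_counts = Counter(orbits)
--
--         total_cost = 0
--         for orbit, count in orbit_counts.items():
--             total_cost += min(count, c)
--
--         results.append(total_cost)
--
--     return results
-- ===== SOURCE B (Python) =====
-- def _case_cost(c, orbits):
--     s = sorted(orbits)
--     if not s:
--         return 0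
--     total = 0
--     prev = s[0]
--     run = 1
--     for x in s[1:]:
--         if x == prev:
--             run += 1
--         else:
--             total += min(run, c)
--             prev = x
--             run = 1
--     return total + min(run, c)
--
--
-- def minimum_destruction_cost(test_cases):
--     return [_case_cost(c, orbits) for n, c, orbits in test_cases]
-- ===== Notes on version B (the rewrite author's own statement) =====
-- stated objective: alternative
-- what changed: Replaces the per-case Counter frequency table and a sum over its items by sorting the orbits and a single run-length scan over the sorted list, adding min(run, c) at each value change.
import Mathlib
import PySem

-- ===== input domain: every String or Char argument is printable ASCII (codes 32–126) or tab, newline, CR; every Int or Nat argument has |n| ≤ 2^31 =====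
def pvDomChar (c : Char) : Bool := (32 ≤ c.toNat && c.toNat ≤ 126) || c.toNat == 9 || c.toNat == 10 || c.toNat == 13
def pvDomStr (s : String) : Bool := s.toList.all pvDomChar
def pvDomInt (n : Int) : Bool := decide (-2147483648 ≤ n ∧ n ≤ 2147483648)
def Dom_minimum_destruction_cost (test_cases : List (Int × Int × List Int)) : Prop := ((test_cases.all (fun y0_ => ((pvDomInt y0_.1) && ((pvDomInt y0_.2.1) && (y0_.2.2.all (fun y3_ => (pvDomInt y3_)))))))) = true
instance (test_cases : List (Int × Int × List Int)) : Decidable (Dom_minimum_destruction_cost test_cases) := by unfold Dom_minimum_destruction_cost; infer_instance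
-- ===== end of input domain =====

-- B replaces A's per-case Counter/frequency-table sum by sorting each case's orbits and
-- doing a single run-length scan of the sorted list (alternative algorithm, same results).

-- ===== PORT A =====
-- A: for each case, build Counter(orbits), then sum min(count, c) over its items.
def minimum_destruction_cost (test_cases : List (Int × Int × List Int)) : List Int :=
  test_cases.foldl (fun results case =>
    let orbit_counts := PySem.Dict.counter case.2.2
    let total_cost := orbit_counts.items.foldl (fun t p => t + min p.2 case.2.1) 0
    results ++ [total_cost]) []

-- ===== PORT B =====
-- B helper: the for-loop over s[1:] with state (total, prev, run), then the final + min(run, c).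
def mdcRunLoop (c : Int) (l : List Int) (prev run total : Int) : Int :=
  match l with
  | [] => total + min run c
  | x :: rest =>
      if x = prev then mdcRunLoop c rest prev (run + 1) total
      else mdcRunLoop c rest x 1 (total + min run c)

def mdcCaseCost (c : Int) (orbits : List Int) : Int :=
  match PySem.List.sorted orbits (fun x => x) false with
  | [] => 0
  | y :: t => mdcRunLoop c t y 1 0

def minimum_destruction_cost_alt (test_cases : List (Int × Int × List Int)) : List Int :=
  test_cases.map (fun case => mdcCaseCost case.2.1 case.2.2)

-- ===== PRECONDITION & SPEC =====
def Spec_minimum_destruction_cost (test_cases : List (Int × Int × List Int)) (out : List Int) : Prop := out = minimum_destruction_cost_alt test_cases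
instance (test_cases : List (Int × Int × List Int)) (out : List Int) : Decidable (Spec_minimum_destruction_cost test_cases out) := by unfold Spec_minimum_destruction_cost; infer_instance

-- ===== CLAIM (what is proved, stated in full; the proofs are below) =====
def Claim_equal_minimum_destruction_cost : Prop := ∀ (test_cases : List (Int × Int × List Int)), Dom_minimum_destruction_cost test_cases → Spec_minimum_destruction_cost test_cases (minimum_destruction_cost test_cases)

-- ===== LEMMAS AND PROOFS =====

-- the common value both per-case computations reach: sum of min(count, c) over the distinct values
def mdcSumMin (c : Int) (xs : List Int) : Int :=
  ((PySem.Set.ofList xs).map (fun k => min ((xs.count k : Int)) c)).sum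

theorem mdcSumMin_perm (c : Int) {l1 l2 : List Int} (h : l1.Perm l2) :
    mdcSumMin c l1 = mdcSumMin c l2 := by
  unfold mdcSumMin
  have hperm : (PySem.Set.ofList l1).Perm (PySem.Set.ofList l2) := by
    rw [List.perm_ext_iff_of_nodup (PySem.Set.nodup_ofList _) (PySem.Set.nodup_ofList _)]
    intro a
    simp [PySem.Set.mem_ofList, h.mem_iff]
  calc ((PySem.Set.ofList l1).map (fun k => min ((l1.count k : Int)) c)).sum
      = ((PySem.Set.ofList l1).map (fun k => min ((l2.count k : Int)) c)).sum := by
        congr 1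
        exact List.map_congr_left (fun a _ => by rw [h.count_eq])
    _ = ((PySem.Set.ofList l2).map (fun k => min ((l2.count k : Int)) c)).sum :=
        (hperm.map _).sum_eq

theorem mdcSumMin_cons (c x : Int) (rest : List Int) :
    mdcSumMin c (x :: rest)
      = min (1 + (rest.count x : Int)) c + mdcSumMin c (rest.filter (fun y => y != x)) := by
  unfold mdcSumMin
  have hperm : (PySem.Set.ofList (x :: rest)).Perm
      (x :: PySem.Set.ofList (rest.filter (fun y => y != x))) := by
    rw [List.perm_ext_iff_of_nodup (PySem.Set.nodup_ofList _)]
    · intro a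
      simp only [PySem.Set.mem_ofList, List.mem_cons, List.mem_filter, bne_iff_ne, ne_eq]
      by_cases ha : a = x <;> simp [ha]
    · refine List.nodup_cons.mpr ⟨?_, PySem.Set.nodup_ofList _⟩
      simp [PySem.Set.mem_ofList]
  rw [(hperm.map (fun k => min (((x :: rest).count k : Int)) c)).sum_eq]
  simp only [List.map_cons, List.sum_cons]
  congr 1
  · congr 1
    rw [List.count_cons_self]
    push_cast; ring
  · congr 1
    refine List.map_congr_left (fun a ha => ?_)
    have hax : a ≠ x := by
      rcases List.mem_filter.mp ((PySem.Set.mem_ofList _ _).mp ha) with ⟨_, h2⟩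
      simpa using h2
    have h1 : (x :: rest).count a = rest.count a := by
      simp [List.count_cons, Ne.symm hax]
    have h2 : (rest.filter (fun y => y != x)).count a = rest.count a := by
      rw [List.count_filter]
      simp [hax]
    rw [h1, ← h2]

theorem mdcRunLoop_eq (c : Int) (l : List Int) :
    ∀ (prev run total : Int), (prev :: l).Pairwise (· ≤ ·) →
    mdcRunLoop c l prev run total
      = total + min (run + (l.count prev : Int)) c
          + mdcSumMin c (l.filter (fun y => y != prev)) := by
  induction l with
  | nil =>
      intro prev run total _
      simp [mdcRunLoop, mdcSumMin, PySem.Set.ofList]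
  | cons x rest ih =>
      intro prev run total h
      have hpx : prev ≤ x := (List.pairwise_cons.mp h).1 x (by simp)
      have hxrest : (x :: rest).Pairwise (· ≤ ·) := (List.pairwise_cons.mp h).2
      by_cases hx : x = prev
      · have hpr : (prev :: rest).Pairwise (· ≤ ·) := by
          subst hx; exact hxrest
        rw [mdcRunLoop]
        simp only [hx]
        rw [ih prev (run + 1) total hpr]
        subst hx
        rw [List.count_cons_self, List.filter_cons_of_neg (by simp)]
        push_cast; ring
      · have hlt : prev < x := lt_of_le_of_ne hpx (fun e => hx e.symm)
        have hnotin : ∀ a ∈ x :: rest, a ≠ prev := by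
          intro a ha
          rcases List.mem_cons.mp ha with rfl | ha'
          · exact hx
          · have : x ≤ a := (List.pairwise_cons.mp hxrest).1 a ha'
            omega
        rw [mdcRunLoop]
        simp only [if_neg hx]
        rw [ih x 1 (total + min run c) hxrest]
        have hcount : (x :: rest).count prev = 0 :=
          List.count_eq_zero.mpr (fun hmem => hnotin prev hmem rfl)
        have hfilter : (x :: rest).filter (fun y => y != prev) = x :: rest :=
          List.filter_eq_self.mpr (fun a ha => by simpa using hnotin a ha)
        rw [hcount, hfilter, mdcSumMin_cons]
        push_cast; ring

theorem mdcCaseCost_eq (c : Int) (orbits : List Int) :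
    mdcCaseCost c orbits = mdcSumMin c orbits := by
  unfold mdcCaseCost
  rcases hs : PySem.List.sorted orbits (fun x => x) false with _ | ⟨y, t⟩
  · have : orbits = [] := (PySem.List.sorted_eq_nil_iff _ _ _).mp hs
    subst this
    simp [mdcSumMin, PySem.Set.ofList]
  · have hpw : (y :: t).Pairwise (· ≤ ·) := by
      have := PySem.List.sorted_pairwise (xs := orbits) (key := fun x => x)
      rw [hs] at this
      exact this
    have hperm : (y :: t).Perm orbits := by
      have := PySem.List.sorted_perm (xs := orbits) (key := fun x => x) (rev := false)
      rw [hs] at this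
      exact this
    show mdcRunLoop c t y 1 0 = mdcSumMin c orbits
    rw [mdcRunLoop_eq c t y 1 0 hpw, zero_add, ← mdcSumMin_cons, mdcSumMin_perm c hperm]

theorem mdcACase_eq (c : Int) (orbits : List Int) :
    (PySem.Dict.counter orbits).items.foldl (fun t p => t + min p.2 c) 0
      = mdcSumMin c orbits := by
  rw [PySem.Dict.items_counter]
  have h := PySem.List.foldl_add
      (l := (PySem.Set.ofList orbits).map (fun k => (k, (orbits.count k : Int))))
      (a := (0 : Int)) (g := fun p : Int × Int => min p.2 c)
  rw [h]
  simp only [List.map_map, zero_add]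
  rfl

-- ===== VERDICT (by name: the statement is the Claim_ definition above) =====
theorem minimum_destruction_cost_spec : Claim_equal_minimum_destruction_cost := by
  intro test_cases _
  unfold Spec_minimum_destruction_cost minimum_destruction_cost minimum_destruction_cost_alt
  show test_cases.foldl (fun results case =>
      results ++ [(PySem.Dict.counter case.2.2).items.foldl
        (fun t p => t + min p.2 case.2.1) 0]) [] = _
  have h := PySem.List.foldl_append_singleton_eq_map (l := test_cases) (acc := ([] : List Int))
        (f := fun case : Int × Int × List Int => (PySem.Dict.counter case.2.2).items.foldl
          (fun t p => t + min p.2 case.2.1) 0)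
  rw [h]
  simp only [List.nil_append]
  exact List.map_congr_left (fun case _ => by
    rw [mdcACase_eq, mdcCaseCost_eq])
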